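-- pv_equiv track=rewrite | github.com/lima-rafa/vtriage | src/vtriage/analyzer.py | expand_location_prefixes
-- ===== SOURCE A (Python) =====
-- def expand_location_prefixes(loc: str | None, levels: int = 2) -> list[str] | None:
--     """
--     Expande prefixes por "drop à esquerda" (mais útil p/ VCD):
--         "tb/u_dut/u_core" -> ["tb.u_dut.u_core", "u_dut.u_core", "u_core"]  (levels=2)
--         "tb.u_dut.u_core" -> ["tb.u_dut.u_core", "u_dut.u_core", "u_core"]  (levels=2)
--
--     levels = quantos drops do começo (left) você permite.
--     Retorna None se não tiver nada útil.
--     """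
--     if not loc:
--         return None
--
--     s = loc.strip().strip(" .:/")
--     if not s:
--         return None
--
--     # normaliza separador para '.'
--     s = s.replace("\\", "/").replace("/", ".")
--     while ".." in s:
--         s = s.replace("..", ".")
--     s = s.strip(".")
--     if not s:
--         return None
--
--     parts = [p for p in s.split(".") if p]
--     if len(parts) == 0:
--         return None
--
--     max_drop = min(levels, max(0, len(parts) - 1))
--
--     out: list[str] = []
--     seen: set[str] = set()
--     for drop in range(0, max_drop + 1):
--         p = ".".join(parts[drop:])
--         if p and p not in seen:
--             out.append(p)
--             seen.add(p)
--
--     return out or None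
-- ===== SOURCE B (Python) =====
-- def expand_location_prefixes(loc, levels=2):
--     if not loc:
--         return None
--
--     s = loc.strip().strip(" .:/")
--     if not s:
--         return None
--
--     s = s.replace("\\", "/").replace("/", ".")
--     while ".." in s:
--         s = s.replace("..", ".")
--     s = s.strip(".")
--     if not s:
--         return None
--
--     parts = [p for p in s.split(".") if p]
--     if not parts:
--         return None
--
--     # how many left-drops are allowed/possible
--     k = min(levels, len(parts) - 1)
--     if k < 0:
--         return None
--
--     # build the k+1 suffix strings right-to-left, each by one prepend;
--     # no dedup set needed: every suffix is strictly shorter than the previous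
--     acc = ".".join(parts[k:])
--     out = [acc]
--     for p in reversed(parts[:k]):
--         acc = p + "." + acc
--         out.append(acc)
--     out.reverse()
--     return out
-- ===== Notes on version B (the rewrite author's own statement) =====
-- stated objective: alternative
-- what changed: The per-drop core that re-joins parts[drop:] for every drop and deduplicates through a seen-set is replaced by a single right-to-left accumulation that builds each suffix from the next one with one prepend (no set, no repeated joins), reversing the collected list at the end; the normalization is kept verbatim.
import Mathlib
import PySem

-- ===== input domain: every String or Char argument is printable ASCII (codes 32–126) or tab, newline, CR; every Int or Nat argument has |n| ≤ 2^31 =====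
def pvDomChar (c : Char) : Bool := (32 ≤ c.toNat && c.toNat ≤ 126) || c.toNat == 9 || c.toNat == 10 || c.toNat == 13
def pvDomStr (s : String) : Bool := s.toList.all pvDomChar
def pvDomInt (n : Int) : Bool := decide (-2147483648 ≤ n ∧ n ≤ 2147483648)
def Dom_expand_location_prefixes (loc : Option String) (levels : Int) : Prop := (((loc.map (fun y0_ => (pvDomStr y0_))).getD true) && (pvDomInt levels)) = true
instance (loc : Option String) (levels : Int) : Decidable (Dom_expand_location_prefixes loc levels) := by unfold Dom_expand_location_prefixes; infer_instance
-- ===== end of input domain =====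

-- B replaces A's per-drop ".".join(parts[drop:]) loop with a seen-set by a single right-to-left
-- accumulation that builds each suffix from the previous one by one prepend (objective: alternative).


-- ===== PORT A =====
-- `while ".." in s: s = s.replace("..", ".")`, ported with fuel `s.length + 1`: each replace of an
-- occurring ".." strictly shortens s, so the Python loop runs at most `s.length` times and the fuel
-- is never exhausted; both ports normalise through this same helper.
def pvCollapseDots : Nat → List Char → List Char
  | 0, s => s
  | n + 1, s =>
    if PySem.Chars.isIn ['.', '.'] s then pvCollapseDots n (PySem.Chars.replace s ['.', '.'] ['.']) else s

-- loop body of A's `for drop in range(0, max_drop + 1)` (state = (out, seen)):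
def pvAStep (parts : List (List Char)) (st : List (List Char) × PySem.Set (List Char))
    (drop : Int) : List (List Char) × PySem.Set (List Char) :=
  let p := PySem.Chars.join ['.'] (PySem.List.slice parts (some drop) none)
  if p ≠ [] ∧ p ∉ st.2 then (st.1 ++ [p], st.2.add p) else st

def expand_location_prefixes (loc : Option String) (levels : Int) : Option (List String) :=
  match loc with
  | none => none
  | some l =>
    if l.toList = [] then none else          -- `if not loc` also catches the empty string
    let s0 := PySem.Chars.stripChars (PySem.Chars.strip l.toList) [' ', '.', ':', '/']
    if s0 = [] then none else
    let s1 := PySem.Chars.replace (PySem.Chars.replace s0 ['\\'] ['/']) ['/'] ['.']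
    let s2 := pvCollapseDots (s1.length + 1) s1
    let s3 := PySem.Chars.stripChars s2 ['.']
    if s3 = [] then none else
    let parts := (PySem.Chars.splitOn s3 ['.']).filter (fun p => p ≠ [])
    if parts.length = 0 then none else
    let maxDrop : Int := min levels (max 0 ((parts.length : Int) - 1))
    let st := (PySem.List.pyRange 0 (maxDrop + 1)).foldl (pvAStep parts) ([], PySem.Set.ofList [])
    if st.1 = [] then none else some (st.1.map String.ofList)

-- ===== PORT B =====
def expand_location_prefixes_alt (loc : Option String) (levels : Int) : Option (List String) :=
  match loc with
  | none => none
  | some l =>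
    if l.toList = [] then none else
    let s0 := PySem.Chars.stripChars (PySem.Chars.strip l.toList) [' ', '.', ':', '/']
    if s0 = [] then none else
    let s1 := PySem.Chars.replace (PySem.Chars.replace s0 ['\\'] ['/']) ['/'] ['.']
    let s2 := pvCollapseDots (s1.length + 1) s1
    let s3 := PySem.Chars.stripChars s2 ['.']
    if s3 = [] then none else
    let parts := (PySem.Chars.splitOn s3 ['.']).filter (fun p => p ≠ [])
    if parts = [] then none else
    let k : Int := min levels ((parts.length : Int) - 1)
    if k < 0 then none else
    let acc0 := PySem.Chars.join ['.'] (PySem.List.slice parts (some k) none)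
    let st := ((PySem.List.slice parts none (some k)).reverse).foldl
      (fun (st : List Char × List (List Char)) p =>
        let acc := p ++ '.' :: st.1
        (acc, st.2 ++ [acc]))
      (acc0, [acc0])
    some ((st.2.reverse).map String.ofList)

-- ===== PRECONDITION & SPEC =====
def Spec_expand_location_prefixes (loc : Option String) (levels : Int) (out : Option (List String)) : Prop := out = expand_location_prefixes_alt loc levels
instance (loc : Option String) (levels : Int) (out : Option (List String)) : Decidable (Spec_expand_location_prefixes loc levels out) := by unfold Spec_expand_location_prefixes; infer_instance

-- ===== CLAIM (what is proved, stated in full; the proofs are below) =====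
def Claim_equal_expand_location_prefixes : Prop := ∀ (loc : Option String) (levels : Int), Dom_expand_location_prefixes loc levels → Spec_expand_location_prefixes loc levels (expand_location_prefixes loc levels)

-- ===== LEMMAS AND PROOFS =====

-- `join ['.'] (parts.drop d)` is what both loops produce; three facts about it.
theorem pv_join_ne_nil (parts : List (List Char)) (hp : ∀ p ∈ parts, p ≠ []) (j : Nat)
    (hj : j < parts.length) : PySem.Chars.join ['.'] (parts.drop j) ≠ [] := by
  rw [List.drop_eq_getElem_cons hj]
  rcases h : parts.drop (j + 1) with _ | ⟨q, rest⟩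
  · rw [PySem.Chars.join_singleton]
    exact hp _ (List.getElem_mem hj)
  · rw [PySem.Chars.join_cons_cons]
    simp

theorem pv_join_step (parts : List (List Char)) (m : Nat) (hm : m + 1 < parts.length) :
    PySem.Chars.join ['.'] (parts.drop m)
      = parts[m]'(by omega) ++ '.' :: PySem.Chars.join ['.'] (parts.drop (m + 1)) := by
  rw [List.drop_eq_getElem_cons (by omega : m < parts.length)]
  rcases h : parts.drop (m + 1) with _ | ⟨q, rest⟩
  · rw [List.drop_eq_nil_iff] at h; omega
  · rw [PySem.Chars.join_cons_cons]
    simp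

theorem pv_join_len_lt (parts : List (List Char)) :
    ∀ (e d : Nat), d < e → e < parts.length →
      (PySem.Chars.join ['.'] (parts.drop e)).length
        < (PySem.Chars.join ['.'] (parts.drop d)).length := by
  intro e
  induction e with
  | zero => omega
  | succ e ih =>
    intro d hd he
    have hstep : (PySem.Chars.join ['.'] (parts.drop (e + 1))).length
        < (PySem.Chars.join ['.'] (parts.drop e)).length := by
      rw [pv_join_step parts e he]
      simp
      omega
    rcases Nat.lt_succ_iff_lt_or_eq.mp hd with h | h
    · exact lt_trans hstep (ih d h (by omega))
    · rw [h]; exact hstep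

-- A's loop over range(0, maxDrop+1) with the seen-set: the dedup never fires, so the state after
-- the first j iterations is just the list of the first j suffix joins (and that list as a set).
theorem pv_afold (parts : List (List Char)) (hp : ∀ p ∈ parts, p ≠ []) (kn : Nat)
    (hk : kn < parts.length) :
    ∀ j, j ≤ kn + 1 →
      ((List.range j).map (fun (i : Nat) => (i : Int))).foldl (pvAStep parts)
        ([], PySem.Set.ofList [])
      = ((List.range j).map (fun d => PySem.Chars.join ['.'] (parts.drop d)),
         PySem.Set.ofList ((List.range j).map (fun d => PySem.Chars.join ['.'] (parts.drop d)))) := by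
  intro j
  induction j with
  | zero => intro _; simp [PySem.Set.ofList_nil]
  | succ j ih =>
    intro hj
    have hjlt : j < parts.length := by omega
    rw [List.range_succ]
    rw [List.map_append, List.foldl_append, ih (by omega)]
    have hslice : PySem.List.slice parts (some ((j : Nat) : Int)) none = parts.drop j := by
      rw [PySem.List.slice_from parts (by omega)]
      simp
    simp only [pvAStep, List.map_cons, List.map_nil, List.foldl_cons, List.foldl_nil, hslice]
    have hnotmem : PySem.Chars.join ['.'] (parts.drop j)
        ∉ PySem.Set.ofList ((List.range j).map (fun d => PySem.Chars.join ['.'] (parts.drop d))) := by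
      rw [PySem.Set.mem_ofList]
      intro hmem
      rcases List.mem_map.mp hmem with ⟨d, hd, heq⟩
      have hdj : d < j := List.mem_range.mp hd
      have := pv_join_len_lt parts j d hdj hjlt
      rw [heq] at this
      omega
    simp only [pv_join_ne_nil parts hp j hjlt, hnotmem, not_false_iff, and_self, if_pos, ne_eq]
    simp only [List.map_append, List.map_cons, List.map_nil, PySem.Set.ofList_append_singleton]

-- B's loop: folding the reversed take over the prepend step turns the suffix join at m into the
-- full join, appending the joins for drops m-1, …, 0 to the output accumulator.
theorem pv_bfold (parts : List (List Char)) :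
    ∀ (m : Nat), m < parts.length → ∀ (os : List (List Char)),
      ((parts.take m).reverse).foldl
        (fun (st : List Char × List (List Char)) p =>
          let acc := p ++ '.' :: st.1
          (acc, st.2 ++ [acc]))
        (PySem.Chars.join ['.'] (parts.drop m), os)
      = (PySem.Chars.join ['.'] parts,
         os ++ ((List.range m).map (fun d => PySem.Chars.join ['.'] (parts.drop d))).reverse) := by
  intro m
  induction m with
  | zero => intro _ os; simp
  | succ m ih =>
    intro hm os
    have htake : parts.take (m + 1) = parts.take m ++ [parts[m]'(by omega)] := by
      rw [List.take_succ]
      simp [List.getElem?_eq_getElem (by omega : m < parts.length)]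
    rw [htake, List.reverse_append]
    simp only [List.reverse_singleton, List.singleton_append, List.foldl_cons]
    rw [show (parts[m]'(by omega) ++ '.' :: PySem.Chars.join ['.'] (parts.drop (m + 1)))
        = PySem.Chars.join ['.'] (parts.drop m) from (pv_join_step parts m hm).symm]
    rw [ih (by omega) (os ++ [PySem.Chars.join ['.'] (parts.drop m)])]
    rw [List.range_succ]
    simp

-- The two loop tails agree for every parts list with non-empty members.
theorem pv_core (parts : List (List Char)) (levels : Int)
    (hp : ∀ p ∈ parts, p ≠ []) (hne : parts ≠ []) :
    (let maxDrop : Int := min levels (max 0 ((parts.length : Int) - 1));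
     let st := (PySem.List.pyRange 0 (maxDrop + 1)).foldl (pvAStep parts) ([], PySem.Set.ofList [])
     if st.1 = [] then none else some (st.1.map String.ofList))
    = (let k : Int := min levels ((parts.length : Int) - 1);
       if k < 0 then none else
       let acc0 := PySem.Chars.join ['.'] (PySem.List.slice parts (some k) none)
       let st := ((PySem.List.slice parts none (some k)).reverse).foldl
         (fun (st : List Char × List (List Char)) p =>
           let acc := p ++ '.' :: st.1
           (acc, st.2 ++ [acc]))
         (acc0, [acc0])
       some ((st.2.reverse).map String.ofList)) := by
  have hlen : 1 ≤ parts.length := List.length_pos_of_ne_nil hne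
  have hmax : max 0 ((parts.length : Int) - 1) = (parts.length : Int) - 1 := by
    rw [max_eq_right]; exact_mod_cast by omega
  simp only [hmax]
  set k : Int := min levels ((parts.length : Int) - 1) with hkdef
  by_cases hneg : k < 0
  · -- levels < 0 : A's range is empty, the out list stays [], A returns none; B returns none.
    rw [PySem.List.pyRange_one_eq_nil (by omega : k + 1 ≤ 0)]
    simp [hneg]
  · push_neg at hneg
    have hkub : k ≤ (parts.length : Int) - 1 := min_le_right _ _
    set kn : Nat := k.toNat with hkndef
    have hkcast : k = (kn : Int) := (Int.toNat_of_nonneg hneg).symm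
    have hknlt : kn < parts.length := by omega
    have hrange : PySem.List.pyRange 0 (k + 1) = (List.range (kn + 1)).map (fun (i : Nat) => (i : Int)) := by
      rw [show k + 1 = ((kn + 1 : Nat) : Int) by omega]
      exact PySem.List.pyRange_zero_natCast (kn + 1)
    rw [hrange, pv_afold parts hp kn hknlt (kn + 1) le_rfl]
    have hsliceFrom : PySem.List.slice parts (some k) none = parts.drop kn := by
      rw [PySem.List.slice_from parts hneg]
    have hsliceTo : PySem.List.slice parts none (some k) = parts.take kn := by
      rw [hkcast]; exact PySem.List.slice_to_natCast parts kn
    simp only [hsliceFrom, hsliceTo, if_neg (by omega : ¬ k < 0)]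
    rw [pv_bfold parts kn hknlt [PySem.Chars.join ['.'] (parts.drop kn)]]
    have hout : (List.range (kn + 1)).map (fun d => PySem.Chars.join ['.'] (parts.drop d)) ≠ [] := by
      simp [List.range_succ]
    rw [if_neg hout]
    congr 1
    rw [List.range_succ]
    simp

-- ===== VERDICT (by name: the statement is the Claim_ definition above) =====
theorem expand_location_prefixes_spec : Claim_equal_expand_location_prefixes := by
  intro loc levels _
  unfold Spec_expand_location_prefixes
  cases loc with
  | none => rfl
  | some l =>
    simp only [expand_location_prefixes, expand_location_prefixes_alt]
    by_cases h1 : l.toList = []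
    · simp [h1]
    rw [if_neg h1, if_neg h1]
    set s0 := PySem.Chars.stripChars (PySem.Chars.strip l.toList) [' ', '.', ':', '/'] with hs0
    by_cases h2 : s0 = []
    · simp [h2]
    rw [if_neg h2, if_neg h2]
    set s1 := PySem.Chars.replace (PySem.Chars.replace s0 ['\\'] ['/']) ['/'] ['.'] with hs1
    set s3 := PySem.Chars.stripChars (pvCollapseDots (s1.length + 1) s1) ['.'] with hs3
    by_cases h3 : s3 = []
    · simp [h3]
    rw [if_neg h3, if_neg h3]
    set parts := (PySem.Chars.splitOn s3 ['.']).filter (fun p => p ≠ []) with hparts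
    by_cases h4 : parts = []
    · simp [h4]
    have h4' : ¬ parts.length = 0 := by simpa [List.length_eq_zero_iff] using h4
    rw [if_neg h4', if_neg h4]
    have hp : ∀ p ∈ parts, p ≠ [] := by
      intro p hpmem
      have := List.of_mem_filter hpmem
      simpa using this
    exact pv_core parts levels hp h4
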